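-- pv_equiv track=rewrite | github.com/vtRodrigues92/RPAs_Cassinos | ROLETAS PLAYPIX/GUILHERME ENVIO BANCO/roletas_creedroomz_playpix.py | pegar_cor
-- ===== SOURCE A (Python) =====
-- def pegar_cor(resultado):
--
--     cor_numeros = {
--             'Vermelho': ['1', '3', '5', '7', '9', '12', '14', '16', '18', '19', '21', '23', '25', '27', '30', '32', '34', '36'],
--             'Preto': ['2', '4', '6', '8', '10', '11', '13', '15', '17', '20', '22', '24', '26', '28', '29', '31', '33', '35'],
--             'Verde': ['0','00']
--             }
--
--     for cor, lista_numeros in cor_numeros.items():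
--         if 'x' in resultado:
--             if resultado.split(' ')[0] in lista_numeros:
--                 return cor
--
--         else:
--             if resultado in lista_numeros:
--                 return cor
-- ===== SOURCE B (Python) =====
-- def _cor_do_numero(key):
--     # arithmetic roulette rule instead of the colour table:
--     # 0/00 are green; within 1..10 and 19..28 odd numbers are red, even black;
--     # within 11..18 and 29..36 the parity flips.
--     if key in ('0', '00'):
--         return 'Verde'
--     if not key.isdigit():
--         return None
--     n = int(key)
--     if key != str(n) or not 1 <= n <= 36:
--         return None
--     red_odd = 1 <= n <= 10 or 19 <= n <= 28
--     if (n % 2 == 1) == red_odd: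
--         return 'Vermelho'
--     return 'Preto'
--
--
-- def pegar_cor(resultado):
--     key = resultado.split(' ')[0] if 'x' in resultado else resultado
--     return _cor_do_numero(key)
-- ===== Notes on version B (the rewrite author's own statement) =====
-- stated objective: alternative
-- what changed: Replaces A's colour table (a loop over three number lists with membership scans) by the arithmetic roulette parity rule: validate the key as a canonical decimal in 1..36 and decide red/black from parity, flipped on 11..18 and 29..36; 0/00 are green.
import Mathlib
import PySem

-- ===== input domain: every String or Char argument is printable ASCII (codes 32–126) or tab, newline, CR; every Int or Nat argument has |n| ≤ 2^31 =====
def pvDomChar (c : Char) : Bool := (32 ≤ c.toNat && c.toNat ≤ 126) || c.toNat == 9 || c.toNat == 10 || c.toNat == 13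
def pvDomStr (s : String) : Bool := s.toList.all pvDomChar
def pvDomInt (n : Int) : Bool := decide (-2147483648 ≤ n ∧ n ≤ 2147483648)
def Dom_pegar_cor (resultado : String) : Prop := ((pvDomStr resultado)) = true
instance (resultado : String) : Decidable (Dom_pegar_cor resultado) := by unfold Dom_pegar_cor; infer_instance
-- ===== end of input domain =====

-- B replaces A's colour table (loop over three number lists) by the arithmetic roulette
-- parity rule on the validated key; objective: alternative algorithm.

-- ===== PORT A =====
def pvReds : List String := ["1", "3", "5", "7", "9", "12", "14", "16", "18", "19", "21", "23", "25", "27", "30", "32", "34", "36"]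
def pvBlacks : List String := ["2", "4", "6", "8", "10", "11", "13", "15", "17", "20", "22", "24", "26", "28", "29", "31", "33", "35"]
def pvGreens : List String := ["0", "00"]
def pvTable : List (String × List String) := [("Vermelho", pvReds), ("Preto", pvBlacks), ("Verde", pvGreens)]

-- the for-loop over cor_numeros.items(), with early return
def pvLoopA (resultado : String) : List (String × List String) → Option String
  | [] => none
  | (cor, lista) :: rest =>
    if PySem.Str.isIn "x" resultado then
      match PySem.Str.split? resultado " " with
      | some parts =>
        match PySem.List.pyGet? parts 0 with
        | some w => if lista.contains w then some cor else pvLoopA resultado rest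
        | none => none   -- IndexError: unreachable (split with a separator never yields [])
      | none => none     -- unreachable: the separator " " is nonempty
    else
      if lista.contains resultado then some cor else pvLoopA resultado rest

def pegar_cor (resultado : String) : Option String := pvLoopA resultado pvTable

-- ===== PORT B =====
-- _cor_do_numero(key): arithmetic roulette rule
def pvCorDoNumero (key : String) : Option String :=
  if key = "0" ∨ key = "00" then some "Verde"
  else if PySem.Str.strIsdigit key = false then none
  else
    match PySem.Int.ofStr? key with   -- n = int(key)
    | none => none   -- ValueError: unreachable, isdigit ⇒ int(key) succeeds on the ASCII domain
    | some n =>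
      if key ≠ PySem.Int.toStr n ∨ ¬ (1 ≤ n ∧ n ≤ 36) then none
      else
        if (PySem.Int.mod n 2 == 1) = decide ((1 ≤ n ∧ n ≤ 10) ∨ (19 ≤ n ∧ n ≤ 28)) then
          some "Vermelho"
        else some "Preto"

def pegar_cor_alt (resultado : String) : Option String :=
  let key? : Option String :=
    if PySem.Str.isIn "x" resultado then
      match PySem.Str.split? resultado " " with
      | some parts => PySem.List.pyGet? parts 0
      | none => none   -- unreachable: the separator " " is nonempty
    else some resultado
  match key? with
  | some k => pvCorDoNumero k
  | none => none

-- ===== PRECONDITION & SPEC =====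
def Spec_pegar_cor (resultado : String) (out : Option String) : Prop := out = pegar_cor_alt resultado
instance (resultado : String) (out : Option String) : Decidable (Spec_pegar_cor resultado out) := by unfold Spec_pegar_cor; infer_instance

-- ===== CLAIM (what is proved, stated in full; the proofs are below) =====
def Claim_equal_pegar_cor : Prop := ∀ (resultado : String), Dom_pegar_cor resultado → Spec_pegar_cor resultado (pegar_cor resultado)

-- ===== LEMMAS AND PROOFS =====

-- B's arithmetic rule on the key equals the three-way membership chain A's loop performs
set_option maxRecDepth 40000 in
lemma pvArith_eq (key : String) :
    pvCorDoNumero key =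
      (if pvReds.contains key then some "Vermelho"
       else if pvBlacks.contains key then some "Preto"
       else if pvGreens.contains key then some "Verde" else none) := by
  by_cases h : key ∈ (["1", "3", "5", "7", "9", "12", "14", "16", "18", "19", "21", "23", "25", "27", "30", "32", "34", "36", "2", "4", "6", "8", "10", "11", "13", "15", "17", "20", "22", "24", "26", "28", "29", "31", "33", "35", "0", "00"] : List String)
  · fin_cases h <;> decide
  · have h1 : key ∉ pvReds := by
      simp only [pvReds, List.mem_cons, List.not_mem_nil]
      simp only [List.mem_cons, List.not_mem_nil, or_false, not_or] at h; tauto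
    have h2 : key ∉ pvBlacks := by
      simp only [pvBlacks, List.mem_cons, List.not_mem_nil]
      simp only [List.mem_cons, List.not_mem_nil, or_false, not_or] at h; tauto
    have h3 : key ∉ pvGreens := by
      simp only [pvGreens, List.mem_cons, List.not_mem_nil]
      simp only [List.mem_cons, List.not_mem_nil, or_false, not_or] at h; tauto
    have c1 : pvReds.contains key = false := by simpa using h1
    have c2 : pvBlacks.contains key = false := by simpa using h2
    have c3 : pvGreens.contains key = false := by simpa using h3
    rw [c1, c2, c3]
    simp only [Bool.false_eq_true, if_false]
    have hz : ¬ (key = "0" ∨ key = "00") := by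
      rintro (rfl | rfl) <;> simp [pvGreens] at h3
    unfold pvCorDoNumero
    rw [if_neg hz]
    rcases hd : PySem.Str.strIsdigit key with _ | _
    · simp
    · simp only [Bool.true_eq_false, if_false]
      rcases ho : PySem.Int.ofStr? key with _ | n
      · rfl
      · dsimp only
        by_cases hv : key ≠ PySem.Int.toStr n ∨ ¬ (1 ≤ n ∧ n ≤ 36)
        · rw [if_pos hv]
        · exfalso
          push Not at hv
          obtain ⟨hkey, h1n, h36⟩ := hv
          interval_cases n <;> (subst hkey; exact h (by decide))

theorem pvVerdictAux (resultado : String) :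
    pvLoopA resultado pvTable = pegar_cor_alt resultado := by
  unfold pegar_cor_alt
  rcases hx : PySem.Str.isIn "x" resultado with _ | _
  · simp only [Bool.false_eq_true, if_false]
    rw [pvArith_eq]
    simp only [pvTable, pvLoopA, hx, Bool.false_eq_true, if_false]
  · rcases hsp : PySem.Str.split? resultado " " with _ | parts
    · simp only [if_true]
      simp only [pvTable, pvLoopA, hx, hsp, if_true]
    · rcases hg : PySem.List.pyGet? parts 0 with _ | w
      · simp only [if_true, hg]
        simp only [pvTable, pvLoopA, hx, hsp, hg, if_true]
      · simp only [if_true, hg]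
        rw [pvArith_eq]
        simp only [pvTable, pvLoopA, hx, hsp, hg, if_true]

-- ===== VERDICT (by name: the statement is the Claim_ definition above) =====
theorem pegar_cor_spec : Claim_equal_pegar_cor := by
  intro resultado _
  unfold Spec_pegar_cor pegar_cor
  exact pvVerdictAux resultado
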